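-- pv_equiv track=rewrite | github.com/joshanashakya/dissertation | workspace/dataset/java-python/GeeksForGeeks/735/A/2.py | solve
-- ===== SOURCE A (Python) =====
-- dp = [0]*1024;
--
-- def get_binary(u) :
--
--     ans = 0;
--     while (u) :
--         rem = u % 10;
--         ans |= (1 << rem);
--         u //= 10;
--     return ans;
--
-- def recur(u, array, n) :
--
--     # Base Condition
--     if (u == 0) :
--         return 0;
--
--     if (dp[u] != -1) :
--         return dp[u];
--
--     temp = 0;
--     for i in range(n) :
--         mask = get_binary(array[i]);
--
--         # Recurrence Relation
--         if ((mask | u) == u) :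
--             dp[u] = max(max(0, dp[u ^ mask]) + array[i], dp[u]);
--
--     return dp[u];
--
-- def solve(array, n)  :
--     i = 0
--
--     # Initialize DP array
--     while(i < (1 << 10)) :
--         dp[i] = -1;
--         i += 1
--
--     ans = 0;
--
--     i = 0
--     # Iterate over all possible masks of 10 bit number
--     while(i < (1 << 10)) :
--         ans = max(ans, recur(i, array, n));
--
--         i += 1
--
--     return ans;
-- ===== SOURCE B (Python) =====
-- # B: precompute the best value per digit-mask in one pass, then a bottom-up DP
-- # over the 1024 masks that enumerates nonempty submasks via (s-1)&u instead of
-- # rescanning all n elements in every state.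
-- def solve(array, n):
--     best = {}
--     for v in array[:max(n, 0)]:
--         m = 0
--         x = v
--         while x:
--             m |= 1 << (x % 10)
--             x //= 10
--         if m and (m not in best or best[m] < v):
--             best[m] = v
--     dp = [-1] * 1024
--     ans = 0
--     for u in range(1, 1024):
--         cur = -1
--         s = u
--         while s:
--             if s in best:
--                 cand = max(0, dp[u ^ s]) + best[s]
--                 if cand > cur:
--                     cur = cand
--             s = (s - 1) & u
--         dp[u] = cur
--         if cur > ans:
--             ans = cur
--     return ans
-- ===== Notes on version B (the rewrite author's own statement) =====
-- stated objective: alternative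
-- what changed: B replaces A's scan of all n elements (each recomputing its digit mask) inside every one of the 1024 mask states by a one-pass table best[mask]=max element value followed by a submask-enumeration DP over the 1024 states, dropping value-0 elements whose empty digit mask never changes the answer; intended as faster (O(n*d + 3^10) vs O(1024*n*d); a timing run measured B 6.22x at the largest size both finished but could not confirm the label since A timed out there).
import Mathlib
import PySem

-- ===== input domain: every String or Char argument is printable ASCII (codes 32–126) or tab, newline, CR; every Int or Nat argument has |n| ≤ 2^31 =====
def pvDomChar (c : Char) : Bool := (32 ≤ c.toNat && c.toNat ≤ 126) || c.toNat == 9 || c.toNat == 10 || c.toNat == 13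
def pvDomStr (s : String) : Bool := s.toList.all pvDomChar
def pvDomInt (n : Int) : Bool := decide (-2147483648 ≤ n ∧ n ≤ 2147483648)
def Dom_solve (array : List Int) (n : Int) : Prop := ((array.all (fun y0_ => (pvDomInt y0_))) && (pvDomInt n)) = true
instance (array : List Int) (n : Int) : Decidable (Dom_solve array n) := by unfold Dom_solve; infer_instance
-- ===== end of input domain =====

-- B replaces A's scan of all n elements inside each of the 1024 DP states by a
-- best-value-per-mask table plus a submask-enumeration DP over the same states.

-- ===== PORT A =====
-- get_binary's digit loop; fuel only makes the recursion structural (fuel = u is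
-- always enough since u//10 < u).  Exact for nonnegative input; Python's
-- get_binary diverges on negative input, which Pre_solve excludes.
def maskGo : Nat → Nat → Nat → Nat
  | 0, _, ans => ans
  | fuel+1, u, ans => if u = 0 then ans else maskGo fuel (u / 10) (ans ||| (1 <<< (u % 10)))

def maskOf (a : Int) : Nat := maskGo a.toNat a.toNat 0

-- the body of recur's `for i in range(n)` loop, for one element a = array[i];
-- all writes hit inside the 1024-entry table, so setIfInBounds is Python's dp[u] = …
def stepElem (u : Nat) (d : Array Int) (a : Int) : Array Int :=
  let mask := maskOf a
  if mask ||| u = u then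
    d.setIfInBounds u (max (max 0 (d.getD (u ^^^ mask) 0) + a) (d.getD u 0))
  else d

-- recur(u, array, n): dp is the 1024-entry table; returns (new dp, dp[u]).
-- IndexError of array[i] is excluded by Pre_solve.
def recurA (array : List Int) (n : Int) (dp : Array Int) (u : Nat) : Array Int × Int :=
  if u = 0 then (dp, 0)
  else if dp.getD u 0 ≠ -1 then (dp, dp.getD u 0)
  else
    let dp' := (PySem.List.pyRange 0 n 1).foldl
      (fun d i => stepElem u d (PySem.List.pyGetD array i 0)) dp
    (dp', dp'.getD u 0)

def solve (array : List Int) (n : Int) : Int :=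
  ((List.range 1024).foldl (fun (st : Array Int × Int) u =>
      let r := recurA array n st.1 u
      (r.1, max st.2 r.2)) (Array.replicate 1024 (-1), 0)).2

-- ===== PORT B =====
-- best-table update for one element (Source B's dict as a function Nat → Option Int)
def bestStep (b : Nat → Option Int) (v : Int) : Nat → Option Int :=
  let m := maskOf v
  if m = 0 then b
  else
    match b m with
    | none => (fun k => if k = m then some v else b k)
    | some w => if w < v then (fun k => if k = m then some v else b k) else b

def bestOf (array : List Int) (n : Int) : Nat → Option Int :=
  (array.take n.toNat).foldl bestStep (fun _ => none)

-- the `while s:` submask-enumeration loop of Source B; fuel only makes the recursion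
-- structural (fuel = the initial s is always enough since (s-1)&&&u < s).
def subGo (best : Nat → Option Int) (dp : Array Int) (u : Nat) : Nat → Nat → Int → Int
  | 0, _, cur => cur
  | fuel+1, s, cur =>
    if s = 0 then cur
    else
      let cur' := match best s with
        | some bv => max cur (max 0 (dp.getD (u ^^^ s) 0) + bv)
        | none => cur
      subGo best dp u fuel ((s - 1) &&& u) cur'

def solve_alt (array : List Int) (n : Int) : Int :=
  let best := bestOf array n
  ((List.range' 1 1023).foldl (fun (st : Array Int × Int) u =>
      let cur := subGo best st.1 u u u (-1)
      (st.1.setIfInBounds u cur, max st.2 cur)) (Array.replicate 1024 (-1), 0)).2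

-- ===== PRECONDITION & SPEC =====
-- Pre_ excludes exactly the inputs where A does not return: n > len(array) makes
-- array[i] raise IndexError, and a negative element among the first n makes
-- get_binary loop forever.
def Pre_solve (array : List Int) (n : Int) : Prop :=
  n ≤ (array.length : Int) ∧ ∀ x ∈ array.take n.toNat, 0 ≤ x
instance (array : List Int) (n : Int) : Decidable (Pre_solve array n) := by
  unfold Pre_solve; infer_instance

def pvWitness_solve : List Int × Int := ([12, 7, 5], 3)

def Spec_solve (array : List Int) (n : Int) (out : Int) : Prop := out = solve_alt array n
instance (array : List Int) (n : Int) (out : Int) : Decidable (Spec_solve array n out) := by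
  unfold Spec_solve; infer_instance

-- ===== CLAIM (what is proved, stated in full; the proofs are below) =====
def Claim_equal_solve : Prop := ∀ (array : List Int) (n : Int),
  Dom_solve array n → Pre_solve array n → Spec_solve array n (solve array n)

-- ===== LEMMAS AND PROOFS =====

-- ---- generic Nat bit lemmas ----
theorem pvBitAnd (a b x y : Nat) (hx : x < 2) (hy : y < 2) :
    (2*a+x) &&& (2*b+y) = 2*(a&&&b)+(x&&&y) := by
  have h1 : (2*a+x)/2 = a := by omega
  have h2 : (2*b+y)/2 = b := by omega
  have h3 : (2*(a&&&b)+(x&&&y))/2 = a&&&b := by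
    have : x &&& y < 2 := Nat.lt_of_le_of_lt Nat.and_le_left hx
    omega
  apply Nat.eq_of_testBit_eq
  intro i
  cases i with
  | zero =>
    simp only [Nat.testBit_zero, Nat.testBit_and] at *
    interval_cases x <;> interval_cases y <;> simp
  | succ j =>
    rw [Nat.testBit_and, Nat.testBit_succ, Nat.testBit_succ, Nat.testBit_succ, h1, h2, h3,
      Nat.testBit_and]

-- submask ↔ or characterisations
theorem pvSubOr {s u : Nat} (h : s &&& u = s) : s ||| u = u := by
  apply Nat.eq_of_testBit_eq
  intro i
  have := congrArg (fun z => z.testBit i) h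
  simp only [Nat.testBit_and] at this
  simp only [Nat.testBit_or]
  cases hs : s.testBit i <;> cases hu : u.testBit i <;> simp_all
theorem pvOrSub {s u : Nat} (h : s ||| u = u) : s &&& u = s := by
  apply Nat.eq_of_testBit_eq
  intro i
  have := congrArg (fun z => z.testBit i) h
  simp only [Nat.testBit_or] at this
  simp only [Nat.testBit_and]
  cases hs : s.testBit i <;> cases hu : u.testBit i <;> simp_all

theorem pvXorNe {s u : Nat} (hs : s ≠ 0) : u ^^^ s ≠ u := by
  intro h
  apply hs
  have h2 : u ^^^ (u ^^^ s) = u ^^^ u := congrArg (fun z => u ^^^ z) h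
  rw [← Nat.xor_assoc, Nat.xor_self, Nat.zero_xor] at h2
  exact h2

-- the crux of the submask enumeration: (s-1)&&&u is ≥ every submask of u below s
theorem pvCrux : ∀ s u v : Nat, s &&& u = s → v &&& u = v → v < s → v ≤ (s-1) &&& u := by
  intro s
  induction s using Nat.strong_induction_on with
  | _ s ih =>
    intro u v hs hv hlt
    have hspos : 0 < s := by omega
    obtain ⟨a, l, hdu, hl⟩ : ∃ a l, u = 2*a + l ∧ l < 2 := ⟨u/2, u%2, by omega, by omega⟩
    obtain ⟨b, m, hds, hm⟩ : ∃ b m, s = 2*b + m ∧ m < 2 := ⟨s/2, s%2, by omega, by omega⟩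
    obtain ⟨c, g, hdv, hg⟩ : ∃ c g, v = 2*c + g ∧ g < 2 := ⟨v/2, v%2, by omega, by omega⟩
    have hands : (2*b+m) &&& (2*a+l) = 2*(b&&&a) + (m&&&l) := pvBitAnd _ _ _ _ hm hl
    have handv : (2*c+g) &&& (2*a+l) = 2*(c&&&a) + (g&&&l) := pvBitAnd _ _ _ _ hg hl
    rw [hds, hdu, hands] at hs
    rw [hdv, hdu, handv] at hv
    have hb1 : m&&&l < 2 := Nat.lt_of_le_of_lt Nat.and_le_left hm
    have hb2 : g&&&l < 2 := Nat.lt_of_le_of_lt Nat.and_le_left hg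
    have hsc1 : b&&&a = b := by omega
    have hsc2 : m&&&l = m := by omega
    have hvc1 : c&&&a = c := by omega
    have hvc2 : g&&&l = g := by omega
    rcases Nat.eq_zero_or_pos m with hm0 | hm1
    · -- s = 2b, b ≥ 1 ; s-1 = 2(b-1)+1
      have hbpos : 0 < b := by omega
      have hcb : c < b := by omega
      have hih : c ≤ (b-1) &&& a := ih b (by omega) a c hsc1 hvc1 hcb
      have hsplit : s - 1 = 2*(b-1) + 1 := by omega
      have hstep : (2*(b-1)+1) &&& (2*a+l) = 2*((b-1)&&&a) + (1&&&l) :=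
        pvBitAnd _ _ _ _ (by omega) hl
      rw [hsplit, hdu, hstep]
      have hgl : g ≤ 1&&&l := by
        interval_cases g <;> interval_cases l <;> simp_all
      omega
    · -- m = 1 : s-1 = 2b, and b &&& a = b so (s-1)&&&u = 2b ≥ v
      have hsplit : s - 1 = 2*b + 0 := by omega
      have hstep : (2*b+0) &&& (2*a+l) = 2*(b&&&a) + (0&&&l) :=
        pvBitAnd _ _ _ _ (by omega) hl
      rw [hsplit, hdu, hstep, hsc1]
      have h0l : (0:Nat)&&&l = 0 := by simp
      omega

-- ---- maskOf ----
theorem pvMaskGoAbsorb : ∀ fuel u ans, ans ||| maskGo fuel u ans = maskGo fuel u ans := by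
  intro fuel
  induction fuel with
  | zero => intro u ans; simp [maskGo]
  | succ f ih =>
    intro u ans
    rw [maskGo]
    by_cases h : u = 0
    · simp [h]
    · rw [if_neg h]
      have h2 := ih (u/10) (ans ||| (1 <<< (u % 10)))
      conv_lhs => rw [← h2]
      rw [← Nat.lor_assoc, ← Nat.lor_assoc, Nat.or_self]
      exact h2

theorem pvMaskZero {x : Int} (hx : 0 ≤ x) : maskOf x = 0 ↔ x = 0 := by
  constructor
  · intro h
    by_contra hne
    have ht : x.toNat ≠ 0 := by omega
    unfold maskOf at h
    obtain ⟨f, hf⟩ : ∃ f, x.toNat = f + 1 := ⟨x.toNat - 1, by omega⟩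
    rw [hf, maskGo, if_neg (by omega)] at h
    have habs := pvMaskGoAbsorb f ((f+1)/10) (0 ||| (1 <<< ((f+1) % 10)))
    rw [h] at habs
    simp at habs
  · intro h; subst h; decide

-- ---- foldl max bounds ----
theorem pvMxLe : ∀ (l : List Int) (i c : Int), i ≤ c → (∀ x ∈ l, x ≤ c) → l.foldl max i ≤ c := by
  intro l
  induction l with
  | nil => intro i c h _; simpa using h
  | cons y t ih =>
    intro i c hi hall
    exact ih _ _ (max_le hi (hall y (by simp))) (fun x hx => hall x (by simp [hx]))
theorem pvLeMxInit : ∀ (l : List Int) (i : Int), i ≤ l.foldl max i := by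
  intro l
  induction l with
  | nil => intro i; simp
  | cons y t ih => intro i; exact le_trans (le_max_left i y) (ih _)
theorem pvLeMxMem : ∀ (l : List Int) (i x : Int), x ∈ l → x ≤ l.foldl max i := by
  intro l
  induction l with
  | nil => intro i x hx; simp at hx
  | cons y t ih =>
    intro i x hx
    rcases List.mem_cons.1 hx with h | h
    · subst h; exact le_trans (le_max_right i x) (pvLeMxInit _ _)
    · exact ih _ _ h

-- A's candidate value for one element, reading smaller dp entries through r
def gA (r : Nat → Int) (u : Nat) (x : Int) : Int :=
  if maskOf x ||| u = u then (if maskOf x = 0 then 0 else max 0 (r (u ^^^ maskOf x)) + x) else -1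

-- B's candidate value for one submask
def gB (best : Nat → Option Int) (r : Nat → Int) (u : Nat) (s : Nat) : Int :=
  match best s with
  | some bv => max 0 (r (u ^^^ s)) + bv
  | none => -1

theorem pvGACongr (u : Nat) (r r' : Nat → Int) (h : ∀ v, v ≠ u → r v = r' v) (x : Int) :
    gA r u x = gA r' u x := by
  unfold gA
  by_cases hm : maskOf x ||| u = u
  · rw [if_pos hm, if_pos hm]
    by_cases hm0 : maskOf x = 0
    · rw [if_pos hm0, if_pos hm0]
    · rw [if_neg hm0, if_neg hm0, h _ (pvXorNe hm0)]
  · rw [if_neg hm, if_neg hm]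

-- ---- Array reads and writes ----
theorem pvGetDSet (a : Array Int) (u w : Nat) (v : Int) :
    (a.setIfInBounds u v).getD w 0 = if w = u ∧ u < a.size then v else a.getD w 0 := by
  simp only [Array.getD_eq_getD_getElem?, Array.getElem?_setIfInBounds]
  by_cases hw : w = u ∧ u < a.size
  · simp [hw.1, hw.2]
  · rw [if_neg hw]
    by_cases h1 : u = w
    · subst h1
      have h2 : ¬ u < a.size := by tauto
      simp [h2]
    · simp [h1]

theorem pvGetDRep (n w : Nat) (h : w < n) : (Array.replicate n (-1 : Int)).getD w 0 = -1 := by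
  simp [Array.getD_eq_getD_getElem?, h]

-- ---- A's inner loop: range fold → element fold ----
theorem pvRangeFoldAux {β : Type} (xs : List Int) (g : β → Int → β) :
    ∀ (m : Nat), m ≤ xs.length → ∀ (init : β),
    (List.range m).foldl (fun acc k => g acc (xs.getD k 0)) init = (xs.take m).foldl g init := by
  intro m
  induction m with
  | zero => intro _ init; simp
  | succ k ih =>
    intro hk init
    have hgd : xs.getD k 0 = xs[k]'(by omega) := by
      simp [List.getD, List.getElem?_eq_getElem (by omega : k < xs.length)]
    have htk : xs.take (k+1) = xs.take k ++ [xs[k]'(by omega)] := by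
      rw [List.take_succ]
      simp [List.getElem?_eq_getElem (by omega : k < xs.length)]
    rw [List.range_succ, List.foldl_append, ih (by omega), htk, List.foldl_append]
    simp only [List.foldl_cons, List.foldl_nil]
    rw [hgd]

theorem pvRangeFold {β : Type} (xs : List Int) (n : Int) (hn : n ≤ (xs.length : Int))
    (g : β → Int → β) (init : β) :
    (PySem.List.pyRange 0 n 1).foldl (fun acc j => g acc (PySem.List.pyGetD xs j 0)) init
      = (xs.take n.toNat).foldl g init := by
  rw [PySem.List.pyRange_one, List.foldl_map]
  simp only [zero_add, PySem.List.pyGetD_natCast, Int.sub_zero]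
  exact pvRangeFoldAux xs g n.toNat (by omega) init

-- ---- A's inner loop: one element ----
theorem pvStepElem (u : Nat) (d : Array Int) (x : Int) (hx : 0 ≤ x) (hu : u < d.size)
    (hdu : -1 ≤ d.getD u 0) :
    (stepElem u d x).size = d.size ∧
    ∀ w, (stepElem u d x).getD w 0 =
      if w = u then max (d.getD u 0) (gA (fun v => d.getD v 0) u x) else d.getD w 0 := by
  refine ⟨?_, ?_⟩
  · unfold stepElem
    by_cases hm : maskOf x ||| u = u
    · rw [if_pos hm]; exact Array.size_setIfInBounds
    · rw [if_neg hm]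
  · intro w
    unfold stepElem gA
    by_cases hm : maskOf x ||| u = u
    · rw [if_pos hm, if_pos hm, pvGetDSet]
      simp only [hu, and_true]
      by_cases hw : w = u
      · rw [if_pos hw, if_pos hw]
        by_cases hm0 : maskOf x = 0
        · have hx0 : x = 0 := (pvMaskZero hx).1 hm0
          rw [hm0, Nat.xor_zero, hx0, if_pos rfl]
          omega
        · rw [if_neg hm0]
          omega
      · rw [if_neg hw, if_neg hw]
    · rw [if_neg hm, if_neg hm]
      by_cases hw : w = u
      · rw [if_pos hw, hw]
        omega
      · rw [if_neg hw]

-- ---- A's inner loop over elements: reduces to a foldl max over candidates ----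
theorem pvInnerA (u : Nat) : ∀ (xs : List Int), (∀ x ∈ xs, 0 ≤ x) →
    ∀ (d : Array Int), u < d.size → -1 ≤ d.getD u 0 →
    (xs.foldl (stepElem u) d).size = d.size ∧
    ∀ w, (xs.foldl (stepElem u) d).getD w 0 =
      if w = u then (xs.map (gA (fun v => d.getD v 0) u)).foldl max (d.getD u 0)
      else d.getD w 0 := by
  intro xs
  induction xs with
  | nil =>
    intro _ d _ _
    refine ⟨rfl, fun w => ?_⟩
    by_cases hw : w = u
    · rw [if_pos hw, hw]; rfl
    · rw [if_neg hw]; rfl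
  | cons x t ih =>
    intro hxs d hu hdu
    obtain ⟨hs1, hw1⟩ := pvStepElem u d x (hxs x (by simp)) hu hdu
    have hu1 : u < (stepElem u d x).size := by rw [hs1]; exact hu
    have hdu1 : -1 ≤ (stepElem u d x).getD u 0 := by
      rw [hw1 u, if_pos rfl]
      omega
    obtain ⟨hs2, hw2⟩ := ih (fun y hy => hxs y (by simp [hy])) (stepElem u d x) hu1 hdu1
    refine ⟨by rw [List.foldl_cons, hs2, hs1], ?_⟩
    intro w
    rw [List.foldl_cons, hw2 w]
    by_cases hw : w = u
    · rw [if_pos hw, if_pos hw, List.map_cons, List.foldl_cons]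
      have hmap : t.map (gA (fun v => (stepElem u d x).getD v 0) u)
          = t.map (gA (fun v => d.getD v 0) u) := by
        apply List.map_congr_left
        intro a _
        apply pvGACongr
        intro v hv
        rw [hw1 v, if_neg hv]
      rw [hmap, hw1 u, if_pos rfl]
    · rw [if_neg hw, if_neg hw, hw1 w, if_neg hw]

-- ---- the best table ----
theorem pvBestStepZero (b : Nat → Option Int) (x : Int) (h : maskOf x = 0) :
    bestStep b x = b := by
  unfold bestStep; rw [if_pos h]
theorem pvBestStepNone (b : Nat → Option Int) (x : Int) (h : maskOf x ≠ 0)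
    (hb : b (maskOf x) = none) :
    bestStep b x = fun k => if k = maskOf x then some x else b k := by
  unfold bestStep; rw [if_neg h, hb]
theorem pvBestStepLt (b : Nat → Option Int) (x : Int) (w : Int) (h : maskOf x ≠ 0)
    (hb : b (maskOf x) = some w) (hlt : w < x) :
    bestStep b x = fun k => if k = maskOf x then some x else b k := by
  unfold bestStep; rw [if_neg h, hb]; exact if_pos hlt
theorem pvBestStepGe (b : Nat → Option Int) (x : Int) (w : Int) (h : maskOf x ≠ 0)
    (hb : b (maskOf x) = some w) (hge : ¬ w < x) :
    bestStep b x = b := by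
  unfold bestStep; rw [if_neg h, hb]; exact if_neg hge

theorem pvBestStepMono (b : Nat → Option Int) (x : Int) :
    ∀ m w, b m = some w → ∃ w', bestStep b x m = some w' ∧ w ≤ w' := by
  intro m w hm
  by_cases h0 : maskOf x = 0
  · exact ⟨w, by rw [pvBestStepZero b x h0]; exact hm, le_rfl⟩
  · rcases hb : b (maskOf x) with _ | w0
    · rw [pvBestStepNone b x h0 hb]
      by_cases hmm : m = maskOf x
      · rw [hmm] at hm; rw [hm] at hb; cases hb
      · exact ⟨w, by simp [if_neg hmm, hm], le_rfl⟩
    · by_cases hlt : w0 < x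
      · rw [pvBestStepLt b x w0 h0 hb hlt]
        by_cases hmm : m = maskOf x
        · subst hmm
          rw [hm] at hb
          refine ⟨x, by simp, ?_⟩
          cases hb
          omega
        · exact ⟨w, by simp [if_neg hmm, hm], le_rfl⟩
      · rw [pvBestStepGe b x w0 h0 hb hlt]
        exact ⟨w, hm, le_rfl⟩

theorem pvBestStepSelf (b : Nat → Option Int) (x : Int) (h0 : maskOf x ≠ 0) :
    ∃ w, bestStep b x (maskOf x) = some w ∧ x ≤ w := by
  rcases hb : b (maskOf x) with _ | w0
  · rw [pvBestStepNone b x h0 hb]; exact ⟨x, by simp, le_rfl⟩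
  · by_cases hlt : w0 < x
    · rw [pvBestStepLt b x w0 h0 hb hlt]; exact ⟨x, by simp, le_rfl⟩
    · rw [pvBestStepGe b x w0 h0 hb hlt]; exact ⟨w0, hb, by omega⟩

theorem pvBestStepProv (b : Nat → Option Int) (x : Int) :
    ∀ s bv, bestStep b x s = some bv → b s = some bv ∨ (bv = x ∧ maskOf x = s ∧ s ≠ 0) := by
  intro s bv h
  by_cases h0 : maskOf x = 0
  · rw [pvBestStepZero b x h0] at h; exact Or.inl h
  · rcases hb : b (maskOf x) with _ | w0
    · rw [pvBestStepNone b x h0 hb] at h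
      by_cases hs : s = maskOf x
      · subst hs
        simp at h
        exact Or.inr ⟨h.symm, rfl, h0⟩
      · simp [if_neg hs] at h
        exact Or.inl h
    · by_cases hlt : w0 < x
      · rw [pvBestStepLt b x w0 h0 hb hlt] at h
        by_cases hs : s = maskOf x
        · subst hs
          simp at h
          exact Or.inr ⟨h.symm, rfl, h0⟩
        · simp [if_neg hs] at h
          exact Or.inl h
      · rw [pvBestStepGe b x w0 h0 hb hlt] at h
        exact Or.inl h

theorem pvBestSpec (xs : List Int) :
    ∀ (b0 : Nat → Option Int),
    (∀ m w, b0 m = some w → ∃ w', (xs.foldl bestStep b0) m = some w' ∧ w ≤ w') ∧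
    (∀ x ∈ xs, maskOf x ≠ 0 → ∃ w', (xs.foldl bestStep b0) (maskOf x) = some w' ∧ x ≤ w') ∧
    (∀ s bv, (xs.foldl bestStep b0) s = some bv →
       b0 s = some bv ∨ (bv ∈ xs ∧ maskOf bv = s ∧ s ≠ 0)) := by
  induction xs with
  | nil => intro b0; refine ⟨fun m w h => ⟨w, h, le_rfl⟩, by simp, fun s bv h => Or.inl h⟩
  | cons x t ih =>
    intro b0
    obtain ⟨ihmono, ihself, ihprov⟩ := ih (bestStep b0 x)
    rw [List.foldl_cons]
    refine ⟨?_, ?_, ?_⟩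
    · intro m w hm
      obtain ⟨w1, hw1, hle1⟩ := pvBestStepMono b0 x m w hm
      obtain ⟨w2, hw2, hle2⟩ := ihmono m w1 hw1
      exact ⟨w2, hw2, le_trans hle1 hle2⟩
    · intro y hy h0
      rcases List.mem_cons.1 hy with h | h
      · subst h
        obtain ⟨w1, hw1, hle1⟩ := pvBestStepSelf b0 y h0
        obtain ⟨w2, hw2, hle2⟩ := ihmono _ w1 hw1
        exact ⟨w2, hw2, le_trans hle1 hle2⟩
      · exact ihself y h h0
    · intro s bv h
      rcases ihprov s bv h with h1 | h1
      · rcases pvBestStepProv b0 x s bv h1 with h2 | h2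
        · exact Or.inl h2
        · exact Or.inr ⟨by simp [h2.1], h2.1 ▸ h2.2.1, h2.2.2⟩
      · exact Or.inr ⟨by simp [h1.1], h1.2.1, h1.2.2⟩

-- ---- subGo bounds ----
theorem pvSubGoGeCur (best : Nat → Option Int) (dp : Array Int) (u : Nat) :
    ∀ fuel s cur, cur ≤ subGo best dp u fuel s cur := by
  intro fuel
  induction fuel with
  | zero => intro s cur; rw [subGo]
  | succ f ih =>
    intro s cur
    rw [subGo]
    by_cases hs : s = 0
    · rw [if_pos hs]
    · rw [if_neg hs]
      rcases hb : best s with _ | bv <;> simp only [hb]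
      · exact ih _ _
      · exact le_trans (le_max_left _ _) (ih _ _)

theorem pvSubGoLe (best : Nat → Option Int) (dp : Array Int) (u : Nat) (c : Int) :
    ∀ fuel s cur, s &&& u = s → cur ≤ c →
      (∀ s', s' ≠ 0 → s' &&& u = s' → s' ≤ s → gB best (fun v => dp.getD v 0) u s' ≤ c) →
      subGo best dp u fuel s cur ≤ c := by
  intro fuel
  induction fuel with
  | zero => intro s cur _ hcur _; rw [subGo]; exact hcur
  | succ f ih =>
    intro s cur hsu hcur hall
    rw [subGo]
    by_cases hs : s = 0
    · rw [if_pos hs]; exact hcur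
    · rw [if_neg hs]
      have hnext : ((s-1) &&& u) &&& u = (s-1) &&& u := by
        rw [Nat.and_assoc, Nat.and_self]
      have hcur' : (match best s with
          | some bv => max cur (max 0 (dp.getD (u ^^^ s) 0) + bv)
          | none => cur) ≤ c := by
        rcases hb : best s with _ | bv <;> simp only [hb]
        · exact hcur
        · refine max_le hcur ?_
          have h2 := hall s hs hsu le_rfl
          unfold gB at h2
          rw [hb] at h2
          exact h2
      exact ih _ _ hnext hcur'
        (fun s2 hs2 hsu2 hle2 =>
          hall s2 hs2 hsu2 (le_trans hle2 (le_trans Nat.and_le_left (by omega))))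

theorem pvSubGoGe (best : Nat → Option Int) (dp : Array Int) (u : Nat) :
    ∀ fuel s cur s', s ≤ fuel → s &&& u = s → -1 ≤ cur → s' ≠ 0 → s' &&& u = s' → s' ≤ s →
      gB best (fun v => dp.getD v 0) u s' ≤ subGo best dp u fuel s cur := by
  intro fuel
  induction fuel with
  | zero => intro s cur s' hf _ _ hs' _ hle; omega
  | succ f ih =>
    intro s cur s' hf hsu hcur hs' hs'u hle
    have hs0 : s ≠ 0 := by omega
    rw [subGo, if_neg hs0]
    have hnext : ((s-1) &&& u) &&& u = (s-1) &&& u := by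
      rw [Nat.and_assoc, Nat.and_self]
    have hfn : (s-1) &&& u ≤ f := le_trans Nat.and_le_left (by omega)
    rcases Nat.lt_or_ge s' s with hslt | hsge
    · have hcrux : s' ≤ (s-1) &&& u := pvCrux s u s' hsu hs'u hslt
      have hcur' : -1 ≤ (match best s with
          | some bv => max cur (max 0 (dp.getD (u ^^^ s) 0) + bv)
          | none => cur) := by
        rcases hb : best s with _ | bv <;> simp only [hb]
        · exact hcur
        · exact le_trans hcur (le_max_left _ _)
      exact ih _ _ s' hfn hnext hcur' hs' hs'u hcrux
    · have hseq : s' = s := by omega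
      subst hseq
      rcases hb : best s' with _ | bv <;> simp only [hb]
      · have hgbn : gB best (fun v => dp.getD v 0) u s' = -1 := by unfold gB; rw [hb]
        rw [hgbn]
        exact le_trans hcur (pvSubGoGeCur best dp u _ _ _)
      · have hgbs : gB best (fun v => dp.getD v 0) u s'
            = max 0 (dp.getD (u ^^^ s') 0) + bv := by unfold gB; rw [hb]
        rw [hgbs]
        exact le_trans (le_max_right cur _) (pvSubGoGeCur best dp u _ _ _)

-- ---- the heart: per-state equality up to flooring at 0 ----
theorem pvHeart (array : List Int) (n : Int) (u : Nat) (hu : 1 ≤ u)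
    (hxs : ∀ x ∈ array.take n.toNat, 0 ≤ x)
    (rA : Nat → Int) (dB : Array Int) (hr : ∀ v, max 0 (rA v) = max 0 (dB.getD v 0)) :
    max 0 (((array.take n.toNat).map (gA rA u)).foldl max (-1))
      = max 0 (subGo (bestOf array n) dB u u u (-1)) := by
  obtain ⟨_, hself, hprov⟩ := pvBestSpec (array.take n.toNat) (fun _ => none)
  apply le_antisymm
  · apply max_le (le_max_left _ _)
    apply pvMxLe _ _ _ (by omega) ?_
    intro y hy
    obtain ⟨x, hxmem, rfl⟩ := List.mem_map.1 hy
    have hx : 0 ≤ x := hxs x hxmem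
    unfold gA
    by_cases hm : maskOf x ||| u = u
    · rw [if_pos hm]
      by_cases hm0 : maskOf x = 0
      · rw [if_pos hm0]; exact le_max_left _ _
      · rw [if_neg hm0]
        obtain ⟨bv, hbv, hxle⟩ := hself x hxmem hm0
        have hgb : gB (bestOf array n) (fun v => dB.getD v 0) u (maskOf x)
            = max 0 (dB.getD (u ^^^ maskOf x) 0) + bv := by
          unfold gB
          rw [show bestOf array n (maskOf x) = some bv from hbv]
        have h1 : max 0 (rA (u ^^^ maskOf x)) + x
            ≤ gB (bestOf array n) (fun v => dB.getD v 0) u (maskOf x) := by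
          rw [hgb, ← hr]
          omega
        refine le_trans h1 (le_trans ?_ (le_max_right (0:Int) _))
        exact pvSubGoGe (bestOf array n) dB u u u (-1) (maskOf x) le_rfl (Nat.and_self u)
          (by omega) hm0 (pvOrSub hm) ((pvOrSub hm) ▸ Nat.and_le_right)
    · rw [if_neg hm]; omega
  · apply max_le (le_max_left _ _)
    apply pvSubGoLe _ _ _ _ u u (-1) (Nat.and_self u) (by omega) ?_
    intro s hs hsu hsle
    rcases hb : bestOf array n s with _ | bv
    · have hgbn : gB (bestOf array n) (fun v => dB.getD v 0) u s = -1 := by unfold gB; rw [hb]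
      rw [hgbn]
      omega
    · rcases hprov s bv hb with h1 | h1
      · cases h1
      · obtain ⟨hbvmem, hbvmask, _⟩ := h1
        have hga : gA rA u bv = max 0 (rA (u ^^^ s)) + bv := by
          unfold gA
          rw [hbvmask, if_pos (pvSubOr hsu), if_neg hs]
        have hgb : gB (bestOf array n) (fun v => dB.getD v 0) u s
            = max 0 (dB.getD (u ^^^ s) 0) + bv := by
          unfold gB; rw [hb]
        have h2 : gA rA u bv ∈ (array.take n.toNat).map (gA rA u) :=
          List.mem_map.2 ⟨bv, hbvmem, rfl⟩
        have h3 := pvLeMxMem _ (-1) _ h2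
        rw [hgb, ← hr]
        rw [hga] at h3
        exact le_trans h3 (le_max_right (0:Int) _)

-- max a x = max a y when a ≥ 0 and the floored values agree
theorem pvMaxFloor (a x y : Int) (ha : 0 ≤ a) (h : max 0 x = max 0 y) : max a x = max a y := by
  omega

-- ---- the outer folds ----
theorem pvOuter (array : List Int) (n : Int) (hn : n ≤ (array.length : Int))
    (hxs : ∀ x ∈ array.take n.toNat, 0 ≤ x) :
    ∀ (L : List Nat) (dA dB : Array Int) (ansA ansB : Int),
      dA.size = 1024 → dB.size = 1024 →
      (∀ u ∈ L, 1 ≤ u) → (∀ u ∈ L, u < 1024) → L.Nodup →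
      (∀ u ∈ L, dA.getD u 0 = -1) →
      (∀ v, max 0 (dA.getD v 0) = max 0 (dB.getD v 0)) →
      ansA = ansB → 0 ≤ ansA →
      (L.foldl (fun (st : Array Int × Int) u =>
          let r := recurA array n st.1 u
          (r.1, max st.2 r.2)) (dA, ansA)).2
        = (L.foldl (fun (st : Array Int × Int) u =>
          let cur := subGo (bestOf array n) st.1 u u u (-1)
          (st.1.setIfInBounds u cur, max st.2 cur)) (dB, ansB)).2 := by
  intro L
  induction L with
  | nil => intro dA dB ansA ansB _ _ _ _ _ _ _ hans _; simpa using hans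
  | cons u t ih =>
    intro dA dB ansA ansB hsA hsB h1 hlt hnd hA hr hans hpos
    simp only [List.foldl_cons]
    have hu : 1 ≤ u := h1 u (by simp)
    have hult : u < 1024 := hlt u (by simp)
    have hAu : dA.getD u 0 = -1 := hA u (by simp)
    have hfold : (PySem.List.pyRange 0 n 1).foldl
        (fun d i => stepElem u d (PySem.List.pyGetD array i 0)) dA
        = (array.take n.toNat).foldl (stepElem u) dA :=
      pvRangeFold array n hn (stepElem u) dA
    obtain ⟨hsz, hwv⟩ := pvInnerA u (array.take n.toNat) hxs dA
      (by rw [hsA]; exact hult) (le_of_eq hAu.symm)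
    have hbranch : recurA array n dA u
        = ((array.take n.toNat).foldl (stepElem u) dA,
           ((array.take n.toNat).foldl (stepElem u) dA).getD u 0) := by
      unfold recurA
      rw [if_neg (by omega), if_neg (by simp [hAu])]
      dsimp only
      rw [hfold]
    rw [hbranch]
    have hresA : ((array.take n.toNat).foldl (stepElem u) dA).getD u 0
        = ((array.take n.toNat).map (gA (fun v => dA.getD v 0) u)).foldl max (-1) := by
      rw [hwv u, if_pos rfl, hAu]
    have hheart : max 0 (((array.take n.toNat).foldl (stepElem u) dA).getD u 0)
        = max 0 (subGo (bestOf array n) dB u u u (-1)) := by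
      rw [hresA]
      exact pvHeart array n u hu hxs (fun v => dA.getD v 0) dB hr
    apply ih
    · rw [hsz, hsA]
    · rw [Array.size_setIfInBounds, hsB]
    · intro v hv; exact h1 v (by simp [hv])
    · intro v hv; exact hlt v (by simp [hv])
    · exact hnd.of_cons
    · intro v hv
      have hne : v ≠ u := fun h => (List.nodup_cons.1 hnd).1 (h ▸ hv)
      rw [hwv v, if_neg hne]
      exact hA v (by simp [hv])
    · intro v
      by_cases hv : v = u
      · subst hv
        rw [pvGetDSet, if_pos ⟨rfl, by rw [hsB]; exact hult⟩]
        exact hheart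
      · rw [hwv v, if_neg hv, pvGetDSet, if_neg (fun h => hv h.1)]
        exact hr v
    · rw [hans]
      exact pvMaxFloor ansB _ _ (hans ▸ hpos) hheart
    · exact le_trans hpos (le_max_left _ _)

-- ===== VERDICT (by name: the statement is the Claim_ definition above) =====
theorem solve_spec : Claim_equal_solve := by
  intro array n _ hpre
  unfold Spec_solve solve solve_alt
  have h0 : (List.range 1024) = 0 :: List.range' 1 1023 := by
    rw [List.range_eq_range']
    rfl
  rw [h0]
  simp only [List.foldl_cons]
  have hstep : recurA array n (Array.replicate 1024 (-1)) 0 = (Array.replicate 1024 (-1), 0) := by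
    unfold recurA
    rw [if_pos rfl]
  rw [hstep]
  exact pvOuter array n hpre.1 hpre.2 (List.range' 1 1023) _ _ _ _
    (by simp) (by simp)
    (by intro u hu; exact (List.mem_range'_1.1 hu).1)
    (by intro u hu; have := (List.mem_range'_1.1 hu).2; omega)
    (List.nodup_range')
    (by intro u hu
        have := List.mem_range'_1.1 hu
        exact pvGetDRep 1024 u (by omega))
    (by intro v; rfl)
    rfl
    le_rfl
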